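-- pv_equiv track=rewrite | github.com/jeshadr/work-schedule-bot | run.py | fuzzy_get
-- ===== SOURCE A (Python) =====
-- from typing import Optional, Tuple, List
--
-- def fuzzy_get(props: dict, candidates: list[str], expected_types: list[str]) -> Optional[str]:
--     lowered = {k.lower(): (k, v) for k, v in props.items()}
--     for cand in candidates:
--         x = lowered.get(cand.lower())
--         if x:
--             name, spec = x
--             if spec.get("type") in expected_types:
--                 return name
--     for cand in candidates:
--         x = lowered.get(cand.lower())
--         if x:
--             return x[0]
--     return None
-- ===== SOURCE B (Python) =====
-- from typing import Optional
--
-- def fuzzy_get(props: dict, candidates: list[str], expected_types: list[str]) -> Optional[str]: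
--     # No dict index: reverse-scan props per candidate (last duplicate key wins,
--     # matching dict-comprehension overwrite), single pass with a fallback.
--     items = list(props.items())
--     best = None
--     for cand in candidates:
--         cl = cand.lower()
--         hit = None
--         for k, v in reversed(items):
--             if k.lower() == cl:
--                 hit = (k, v)
--                 break
--         if hit is not None:
--             name, spec = hit
--             if spec.get("type") in expected_types:
--                 return name
--             if best is None:
--                 best = name
--     return best
-- ===== Notes on version B (the rewrite author's own statement) =====
-- stated objective: alternative
-- what changed: B drops A's lowered-key dict entirely: each candidate does a direct reverse scan of the props items for the last case-insensitively matching key, and A's two sequential candidate loops become one pass carrying a fallback accumulator.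
import Mathlib
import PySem

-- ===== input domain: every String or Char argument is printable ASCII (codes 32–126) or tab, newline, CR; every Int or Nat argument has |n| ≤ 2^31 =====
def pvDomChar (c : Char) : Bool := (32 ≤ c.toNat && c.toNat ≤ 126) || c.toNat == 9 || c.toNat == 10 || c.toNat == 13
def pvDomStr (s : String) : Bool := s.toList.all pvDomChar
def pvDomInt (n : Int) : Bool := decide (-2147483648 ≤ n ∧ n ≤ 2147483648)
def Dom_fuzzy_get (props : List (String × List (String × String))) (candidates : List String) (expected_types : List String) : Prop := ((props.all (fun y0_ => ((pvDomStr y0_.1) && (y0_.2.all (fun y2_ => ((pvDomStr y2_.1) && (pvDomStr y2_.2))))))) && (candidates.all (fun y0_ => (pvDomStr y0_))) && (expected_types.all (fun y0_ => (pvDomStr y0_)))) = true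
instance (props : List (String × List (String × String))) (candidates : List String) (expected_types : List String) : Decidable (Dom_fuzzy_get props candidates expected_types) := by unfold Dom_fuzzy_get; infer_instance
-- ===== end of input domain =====

-- B drops A's lowered-key dict: each candidate reverse-scans the props items directly
-- (last duplicate lowered key wins, as in A's dict comprehension) and A's two candidate
-- loops become one pass with a fallback accumulator (objective: alternative).

-- ===== PORT A =====
-- lowered = {k.lower(): (k, v) for k, v in props.items()}
def pvLowered (props : List (String × List (String × String))) : PySem.Dict String (String × List (String × String)) :=
  props.foldl (fun d kv => d.insert (PySem.Str.lower kv.1) (kv.1, kv.2)) PySem.Dict.empty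

-- first loop: return name of first candidate whose spec["type"] is in expected_types
def pvLoop1 (lowered : PySem.Dict String (String × List (String × String)))
    (expected_types : List String) : List String → Option String
  | [] => none
  | cand :: rest =>
    match lowered.get? (PySem.Str.lower cand) with
    | some (name, spec) =>
      -- spec.get("type") in expected_types (None never equals a Dom string)
      if (match (PySem.Dict.mk spec).get? "type" with
          | some t => expected_types.contains t
          | none => false) then some name
      else pvLoop1 lowered expected_types rest
    | none => pvLoop1 lowered expected_types rest

-- second loop: return x[0] for the first existing candidate
def pvLoop2 (lowered : PySem.Dict String (String × List (String × String))) : List String → Option String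
  | [] => none
  | cand :: rest =>
    match lowered.get? (PySem.Str.lower cand) with
    | some x => some x.1
    | none => pvLoop2 lowered rest

def fuzzy_get (props : List (String × List (String × String))) (candidates : List String) (expected_types : List String) : Option String :=
  match pvLoop1 (pvLowered props) expected_types candidates with
  | some r => some r
  | none => pvLoop2 (pvLowered props) candidates

-- ===== PORT B =====
-- inner loop of Source B: reversed(items) scan with break = find? on the reversed list
def pvHit (props : List (String × List (String × String))) (cl : String) :
    Option (String × List (String × String)) :=
  props.reverse.find? (fun kv => PySem.Str.lower kv.1 == cl)

-- single pass over candidates carrying `best` (the fallback)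
def pvGo (props : List (String × List (String × String))) (expected_types : List String) :
    List String → Option String → Option String
  | [], best => best
  | cand :: rest, best =>
    match pvHit props (PySem.Str.lower cand) with
    | none => pvGo props expected_types rest best
    | some (name, spec) =>
      if (match (PySem.Dict.mk spec).get? "type" with
          | some t => expected_types.contains t
          | none => false) then some name
      else pvGo props expected_types rest (best.or (some name))

def fuzzy_get_alt (props : List (String × List (String × String))) (candidates : List String) (expected_types : List String) : Option String :=
  pvGo props expected_types candidates none

-- ===== PRECONDITION & SPEC =====
def Spec_fuzzy_get (props : List (String × List (String × String))) (candidates : List String) (expected_types : List String) (out : Option String) : Prop := out = fuzzy_get_alt props candidates expected_types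
instance (props : List (String × List (String × String))) (candidates : List String) (expected_types : List String) (out : Option String) : Decidable (Spec_fuzzy_get props candidates expected_types out) := by unfold Spec_fuzzy_get; infer_instance

-- ===== CLAIM (what is proved, stated in full; the proofs are below) =====
def Claim_equal_fuzzy_get : Prop := ∀ (props : List (String × List (String × String))) (candidates : List String) (expected_types : List String), Dom_fuzzy_get props candidates expected_types → Spec_fuzzy_get props candidates expected_types (fuzzy_get props candidates expected_types)

-- ===== LEMMAS AND PROOFS =====

-- A's dict lookup IS B's reverse find?: the fold of inserts keeps the LAST value per key
theorem lowered_get_eq (props : List (String × List (String × String)))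
    (d : PySem.Dict String (String × List (String × String))) (key : String) :
    (props.foldl (fun d kv => d.insert (PySem.Str.lower kv.1) (kv.1, kv.2)) d).get? key =
      (props.reverse.find? (fun kv => PySem.Str.lower kv.1 == key)).or (d.get? key) := by
  induction props generalizing d with
  | nil => simp
  | cons kv rest ih =>
    simp only [List.foldl_cons, List.reverse_cons, List.find?_append, ih]
    cases h : rest.reverse.find? (fun kv => PySem.Str.lower kv.1 == key) with
    | some x => simp
    | none =>
      simp only [Option.none_or, List.find?_cons, List.find?_nil]
      by_cases hk : key = PySem.Str.lower kv.1
      · simp [hk, PySem.Dict.get?_insert_self]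
      · have : (PySem.Str.lower kv.1 == key) = false := by
          simp; exact fun h' => hk h'.symm
        simp [this, PySem.Dict.get?_insert_of_ne _ _ hk]

theorem hit_eq (props : List (String × List (String × String))) (cl : String) :
    pvHit props cl = (pvLowered props).get? cl := by
  simp [pvHit, pvLowered, lowered_get_eq]

-- B's single pass computes: loop1's result, else best, else loop2's result
theorem pvGo_eq (props : List (String × List (String × String)))
    (expected_types : List String) (cs : List String) (best : Option String) :
    pvGo props expected_types cs best =
      ((pvLoop1 (pvLowered props) expected_types cs).or
        (best.or (pvLoop2 (pvLowered props) cs))) := by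
  induction cs generalizing best with
  | nil => simp [pvGo, pvLoop1, pvLoop2]
  | cons c rest ih =>
    simp only [pvGo, pvLoop1, pvLoop2, hit_eq]
    cases h : (pvLowered props).get? (PySem.Str.lower c) with
    | none => simp [ih]
    | some x =>
      obtain ⟨name, spec⟩ := x
      dsimp only
      by_cases ht : (match (PySem.Dict.mk spec).get? "type" with
          | some t => expected_types.contains t
          | none => false) = true
      · rw [if_pos ht, if_pos ht]; simp
      · rw [if_neg ht, if_neg ht, ih]
        cases best <;> cases hl : pvLoop1 (pvLowered props) expected_types rest <;> simp

-- ===== VERDICT (by name: the statement is the Claim_ definition above) =====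
theorem fuzzy_get_spec : Claim_equal_fuzzy_get := by
  intro props candidates expected_types _
  unfold Spec_fuzzy_get fuzzy_get fuzzy_get_alt
  rw [pvGo_eq]
  cases pvLoop1 (pvLowered props) expected_types candidates <;> simp
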